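-- pv_equiv track=rewrite | github.com/yorbenlodema/EEG-Pype | src/eeg_preprocessing_umcu/eeg_quantitative_analysis.py | find_mirror_patterns
-- ===== SOURCE A (Python) =====
-- def find_mirror_patterns(combinations):
--     """Create a lookup dictionary for mirror patterns (assumes 0-based ranks)."""
--     if not combinations:
--         return {}
--     mirrors = {}
--     n = len(combinations[0])  # Determine embedding dimension FROM the permutation length
--     mirror_sum = n - 1  # Correct target sum for 0-based ranks
--
--     for i, perm1 in enumerate(combinations):
--         # Optimization: only need to check j > i
--         for j in range(i + 1, len(combinations)):
--             perm2 = combinations[j]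
--             # Check if perm2 is the mirror of perm1
--             is_mirror = True
--             for k in range(n):  # Iterate through elements of the permutations
--                 if perm1[k] + perm2[k] != mirror_sum:
--                     is_mirror = False
--                     break  # No need to check further elements
--             if is_mirror:
--                 mirrors[i] = j
--                 mirrors[j] = i
--     return mirrors
-- ===== SOURCE B (Python) =====
-- def find_mirror_patterns(combinations):
--     """Create a lookup dictionary for mirror patterns (assumes 0-based ranks).
--
--     Hash-based: index every permutation's leading-n tuple once, then look up
--     each permutation's computed mirror tuple instead of scanning all pairs.
--     """
--     if not combinations:
--         return {}
--     n = len(combinations[0])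
--     mirror_sum = n - 1
--
--     index = {}
--     for i, perm in enumerate(combinations):
--         index.setdefault(tuple(perm[k] for k in range(n)), []).append(i)
--
--     mirrors = {}
--     for i, perm in enumerate(combinations):
--         target = tuple(mirror_sum - perm[k] for k in range(n))
--         for j in index.get(target, ()):
--             if j > i:
--                 mirrors[i] = j
--                 mirrors[j] = i
--     return mirrors
-- ===== Notes on version B (the rewrite author's own statement) =====
-- stated objective: alternative
-- what changed: Replaces the all-pairs scan with a hash index from each permutation's leading-n tuple to its indices, so each permutation's mirror partner is found by one dictionary lookup of its computed mirror tuple.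
-- outside the precondition, e.g. on find_mirror_patterns([(0, 1), (5,)]): A returns {}, B raises IndexError
import Mathlib
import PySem

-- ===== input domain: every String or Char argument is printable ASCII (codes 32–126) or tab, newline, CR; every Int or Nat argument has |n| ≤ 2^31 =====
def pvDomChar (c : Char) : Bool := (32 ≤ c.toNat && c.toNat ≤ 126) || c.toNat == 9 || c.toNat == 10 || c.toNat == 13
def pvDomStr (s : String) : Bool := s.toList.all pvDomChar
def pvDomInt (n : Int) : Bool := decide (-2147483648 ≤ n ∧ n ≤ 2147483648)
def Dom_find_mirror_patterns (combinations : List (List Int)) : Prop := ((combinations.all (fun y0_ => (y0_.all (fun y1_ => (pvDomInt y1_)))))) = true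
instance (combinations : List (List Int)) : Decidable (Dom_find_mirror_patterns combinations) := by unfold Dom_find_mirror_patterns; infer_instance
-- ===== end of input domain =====

-- B replaces A's all-pairs scan by a hash index keyed on leading-n tuples (objective: alternative).
-- The Python dict result is rendered as its items list in insertion order.

-- ===== PORT A =====
-- inner k-loop of A with its break: all k < n must satisfy perm1[k] + perm2[k] == mirror_sum
def pvCheckMirror (p1 p2 : List Int) (s : Int) (n : Nat) : Bool :=
  (List.range n).all (fun k =>
    PySem.List.pyGetD p1 (k : Int) 0 + PySem.List.pyGetD p2 (k : Int) 0 == s)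

def find_mirror_patterns (combinations : List (List Int)) : List (Int × Int) :=
  if combinations.isEmpty then [] else
  let n := (combinations.headD []).length
  let mirror_sum : Int := (n : Int) - 1
  let m : Int := PySem.List.len combinations
  ((PySem.List.enumerate combinations).foldl (fun d ip =>
      (PySem.List.pyRange (ip.1 + 1) m 1).foldl (fun d j =>
        if pvCheckMirror ip.2 (PySem.List.pyGetD combinations j []) mirror_sum n then
          (d.insert ip.1 j).insert j ip.1
        else d) d)
    (PySem.Dict.empty : PySem.Dict Int Int)).items

-- ===== PORT B =====
-- tuple(perm[k] for k in range(n))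
def pvKeyOf (p : List Int) (n : Nat) : List Int :=
  (List.range n).map (fun k => PySem.List.pyGetD p (k : Int) 0)

-- tuple(mirror_sum - perm[k] for k in range(n))
def pvMirrorKeyOf (p : List Int) (s : Int) (n : Nat) : List Int :=
  (List.range n).map (fun k => s - PySem.List.pyGetD p (k : Int) 0)

def find_mirror_patterns_alt (combinations : List (List Int)) : List (Int × Int) :=
  if combinations.isEmpty then [] else
  let n := (combinations.headD []).length
  let mirror_sum : Int := (n : Int) - 1
  -- index.setdefault(key, []).append(i)
  let index : PySem.Dict (List Int) (List Int) :=
    (PySem.List.enumerate combinations).foldl (fun d ip =>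
      d.modify (pvKeyOf ip.2 n) [] (· ++ [ip.1])) PySem.Dict.empty
  ((PySem.List.enumerate combinations).foldl (fun d ip =>
      (index.getD (pvMirrorKeyOf ip.2 mirror_sum n) []).foldl (fun d j =>
        if ip.1 < j then (d.insert ip.1 j).insert j ip.1 else d) d)
    (PySem.Dict.empty : PySem.Dict Int Int)).items

-- ===== PRECONDITION & SPEC =====
-- Pre_ requires every row to be at least as long as the first (the embedding dimension n): A indexes
-- perm1[k]/perm2[k] for k < n and raises IndexError on short rows it reaches; on some ragged inputs A
-- happens to return (the k-loop breaks on a mismatch before the short index) while B's tuple building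
-- raises IndexError, so those inputs are excluded (see cites).
def Pre_find_mirror_patterns (combinations : List (List Int)) : Prop :=
  ∀ p ∈ combinations, (combinations.headD []).length ≤ p.length
instance (combinations : List (List Int)) : Decidable (Pre_find_mirror_patterns combinations) := by
  unfold Pre_find_mirror_patterns; infer_instance

def pvWitness_find_mirror_patterns : List (List Int) := [[0, 1], [1, 0], [0, 1]]

def Spec_find_mirror_patterns (combinations : List (List Int)) (out : List (Int × Int)) : Prop :=
  out = find_mirror_patterns_alt combinations
instance (combinations : List (List Int)) (out : List (Int × Int)) : Decidable (Spec_find_mirror_patterns combinations out) := by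
  unfold Spec_find_mirror_patterns; infer_instance

-- ===== CLAIM (what is proved, stated in full; the proofs are below) =====
def Claim_equal_find_mirror_patterns : Prop := ∀ (combinations : List (List Int)), Dom_find_mirror_patterns combinations → Pre_find_mirror_patterns combinations → Spec_find_mirror_patterns combinations (find_mirror_patterns combinations)

-- ===== LEMMAS AND PROOFS =====

-- A's elementwise mirror check is equality of B's key tuples.
lemma pvCheckMirror_eq_key (p1 p2 : List Int) (s : Int) (n : Nat) :
    pvCheckMirror p1 p2 s n = (pvKeyOf p2 n == pvMirrorKeyOf p1 s n) := by
  rw [Bool.eq_iff_iff]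
  simp only [pvCheckMirror, pvKeyOf, pvMirrorKeyOf, List.all_eq_true, beq_iff_eq,
    List.map_inj_left, List.mem_range]
  constructor
  · intro h a ha
    simp only [List.pure_def, List.bind_eq_flatMap, List.mem_flatMap, List.mem_range,
      List.mem_singleton] at ha
    obtain ⟨k, hk, rfl⟩ := ha
    have := h k hk
    omega
  · intro h k hk
    have := h (k : Int) (by
      simp only [List.pure_def, List.bind_eq_flatMap, List.mem_flatMap, List.mem_range,
        List.mem_singleton]
      exact ⟨k, hk, rfl⟩)
    omega

-- the index fold maps every key to the (ascending) indices of the rows carrying that key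
lemma pvGetD_index_fold (n : Nat) (l : List (Int × List Int))
    (d : PySem.Dict (List Int) (List Int)) (ks : List Int) :
    (l.foldl (fun d ip => d.modify (pvKeyOf ip.2 n) [] (· ++ [ip.1])) d).getD ks []
      = d.getD ks [] ++ (l.filter (fun ip => pvKeyOf ip.2 n == ks)).map (·.1) := by
  induction l generalizing d with
  | nil => simp
  | cons ip t ih =>
    simp only [List.foldl_cons, ih, List.filter_cons]
    by_cases h : pvKeyOf ip.2 n = ks
    · subst h
      rw [PySem.Dict.getD_modify_self]
      simp
    · rw [PySem.Dict.getD_modify_of_ne _ _ _ (fun hne => h hne.symm)]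
      simp [h]

lemma pvFilter_le_range (a M : Nat) :
    (List.range M).filter (fun k => decide (a ≤ k)) = (List.range (M - a)).map (a + ·) := by
  induction M with
  | zero => simp
  | succ M ih =>
    rw [List.range_succ, List.filter_append, ih]
    by_cases h : a ≤ M
    · have : M + 1 - a = (M - a) + 1 := by omega
      rw [this, List.range_succ, List.map_append]
      simp [h]
    · have h1 : M + 1 - a = 0 := by omega
      have h2 : M - a = 0 := by omega
      simp [h1, h2, h]

lemma pvPyRange_filter_lt (i m : Int) (hi : 0 ≤ i) :
    (PySem.List.pyRange 0 m 1).filter (fun j => decide (i < j)) = PySem.List.pyRange (i + 1) m 1 := by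
  rw [PySem.List.pyRange_one, PySem.List.pyRange_one, List.filter_map]
  have hp : ((fun j => decide (i < j)) ∘ fun k : Nat => (0 : Int) + ↑k)
      = fun k : Nat => decide (i.toNat + 1 ≤ k) := by
    funext k
    simp only [Function.comp_apply, decide_eq_decide]
    omega
  rw [hp, pvFilter_le_range, List.map_map]
  have hlen : (m - 0).toNat - (i.toNat + 1) = (m - (i + 1)).toNat := by omega
  rw [hlen]
  apply List.map_congr_left
  intro k _
  simp only [Function.comp_apply]
  omega

-- the j-lists the two inner loops actually insert over are the same list
lemma pvInner_lists (combos : List (List Int)) (n : Nat) (s i : Int) (p1 : List Int)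
    (hi : 0 ≤ i) :
    (PySem.List.pyRange (i + 1) (PySem.List.len combos) 1).filter
        (fun j => pvCheckMirror p1 (PySem.List.pyGetD combos j []) s n)
      = (((PySem.List.enumerate combos).foldl
            (fun d ip => d.modify (pvKeyOf ip.2 n) [] (· ++ [ip.1]))
            (PySem.Dict.empty : PySem.Dict (List Int) (List Int))).getD
          (pvMirrorKeyOf p1 s n) []).filter (fun j => decide (i < j)) := by
  rw [pvGetD_index_fold, PySem.Dict.getD_empty, List.nil_append,
    PySem.List.enumerate_eq_map_pyRange combos []]
  rw [List.filter_map, List.filter_map, List.filter_map, List.map_map, List.filter_filter]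
  have h1 : ((fun ip : Int × List Int => ip.1) ∘ fun j => (j, PySem.List.pyGetD combos j []))
      = id := by funext j; rfl
  rw [h1, List.map_id, ← pvPyRange_filter_lt i (PySem.List.len combos) hi, List.filter_filter]
  apply List.filter_congr
  intro j _
  simp only [Function.comp_apply, pvCheckMirror_eq_key, Bool.and_comm]

-- ===== VERDICT (by name: the statement is the Claim_ definition above) =====
theorem find_mirror_patterns_spec : Claim_equal_find_mirror_patterns := by
  intro combos _ _
  unfold Spec_find_mirror_patterns find_mirror_patterns find_mirror_patterns_alt
  by_cases hc : combos.isEmpty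
  · simp [hc]
  · simp only [hc]
    apply congrArg PySem.Dict.items
    apply List.foldl_ext
    intro d ip hip
    have hi : 0 ≤ ip.1 := by
      rcases (PySem.List.mem_enumerate_iff combos 0 ip).mp hip with ⟨k, hk, hp⟩
      simp [hp]
    have hB : (fun (d : PySem.Dict Int Int) j =>
        if ip.1 < j then (d.insert ip.1 j).insert j ip.1 else d)
        = (fun d j => if (fun j => decide (ip.1 < j)) j = true
            then (d.insert ip.1 j).insert j ip.1 else d) := by
      funext d j; simp
    rw [hB, ← List.foldl_filter, ← List.foldl_filter, pvInner_lists combos _ _ _ _ hi]
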